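-- pv_equiv track=rewrite | github.com/BillioncodesInc/ginx1 | phishcreator/modules/intelligent_credential_extractor.py | _find_delimiter
-- ===== SOURCE A (Python) =====
-- def _find_delimiter(text: str, reverse: bool = False) -> str:
--     """Find delimiter character in text"""
--     delimiters = ['"', "'", ':', '=', ',', '[', ']', '{', '}']
--
--     if reverse:
--         text = text[::-1]
--
--     for char in text:
--         if char in delimiters:
--             return char
--
--     return ''
-- ===== SOURCE B (Python) =====
-- _DELIMITERS = ['"', "'", ':', '=', ',', '[', ']', '{', '}']
--
--
-- def _find_delimiter(text: str, reverse: bool = False) -> str: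
--     """Find delimiter character in text"""
--     if reverse:
--         text = text[::-1]
--     positions = [p for p in (text.find(d) for d in _DELIMITERS) if p != -1]
--     if not positions:
--         return ''
--     return text[min(positions)]
-- ===== Notes on version B (the rewrite author's own statement) =====
-- stated objective: idiomatic
-- what changed: A scans the (possibly reversed) text character by character testing membership in the delimiter list; B instead calls str.find once per delimiter and returns the character at the minimum hit position, with no per-character Python loop.
import Mathlib
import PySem

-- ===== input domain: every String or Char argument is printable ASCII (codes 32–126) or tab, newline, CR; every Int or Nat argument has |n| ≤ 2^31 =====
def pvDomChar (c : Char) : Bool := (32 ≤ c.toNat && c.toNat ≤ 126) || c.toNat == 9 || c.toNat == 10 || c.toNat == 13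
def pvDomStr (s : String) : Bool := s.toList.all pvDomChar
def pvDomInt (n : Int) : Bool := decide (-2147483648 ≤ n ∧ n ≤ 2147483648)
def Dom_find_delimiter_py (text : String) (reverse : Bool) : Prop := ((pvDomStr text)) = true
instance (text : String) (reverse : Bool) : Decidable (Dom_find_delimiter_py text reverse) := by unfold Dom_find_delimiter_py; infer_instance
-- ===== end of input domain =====

-- B replaces A's per-character scan by one str.find per delimiter plus min over the hit
-- positions (objective: idiomatic; the 9 finds run in C in Python).

-- the delimiter list shared by both Pythons
def pvDelims : List Char := ['"', '\'', ':', '=', ',', '[', ']', '{', '}']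

-- ===== PORT A =====
-- for char in text: if char in delimiters: return char; after the loop return ''
def pvScanA : List Char → String
  | [] => ""
  | c :: rest => if c ∈ pvDelims then String.ofList [c] else pvScanA rest

def find_delimiter_py (text : String) (reverse : Bool) : String :=
  -- if reverse: text = text[::-1]
  let s := if reverse then (PySem.List.slice? text.toList none none (-1)).getD [] else text.toList
  pvScanA s

-- ===== PORT B =====
def find_delimiter_py_alt (text : String) (reverse : Bool) : String :=
  -- if reverse: text = text[::-1]
  let s := if reverse then (PySem.List.slice? text.toList none none (-1)).getD [] else text.toList
  -- positions = [p for p in (text.find(d) for d in _DELIMITERS) if p != -1]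
  let positions := pvDelims.filterMap (fun d =>
    let p := PySem.Chars.find s [d]
    if p = -1 then none else some p)
  -- if not positions: return '';  return text[min(positions)]
  match PySem.List.min? positions (fun x => x) with
  | none => ""
  | some i =>
    match PySem.List.pyGet? s i with
    | some c => String.ofList [c]
    | none => ""  -- unreachable: i is a position returned by find, a valid index

-- ===== PRECONDITION & SPEC =====
def Spec_find_delimiter_py (text : String) (reverse : Bool) (out : String) : Prop := out = find_delimiter_py_alt text reverse
instance (text : String) (reverse : Bool) (out : String) : Decidable (Spec_find_delimiter_py text reverse out) := by unfold Spec_find_delimiter_py; infer_instance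

-- ===== CLAIM (what is proved, stated in full; the proofs are below) =====
def Claim_equal_find_delimiter_py : Prop := ∀ (text : String) (reverse : Bool), Dom_find_delimiter_py text reverse → Spec_find_delimiter_py text reverse (find_delimiter_py text reverse)

-- ===== LEMMAS AND PROOFS =====

-- first index of d in s, -1 if absent (proof-side model of s.find(d) for one char)
def pvFIdx (d : Char) : List Char → Int
  | [] => -1
  | c :: t => if c = d then 0 else (if pvFIdx d t = -1 then -1 else pvFIdx d t + 1)

theorem pvFIdx_ge (d : Char) (s : List Char) : -1 ≤ pvFIdx d s := by
  induction s with
  | nil => simp [pvFIdx]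
  | cons c t ih => simp only [pvFIdx]; split_ifs <;> omega

theorem pvFIdx_eq_neg_one_iff (d : Char) (s : List Char) : pvFIdx d s = -1 ↔ d ∉ s := by
  induction s with
  | nil => simp [pvFIdx]
  | cons c t ih =>
    rw [pvFIdx]
    by_cases h1 : c = d
    · subst h1; simp
    · rw [if_neg h1]
      by_cases h2 : pvFIdx d t = -1
      · rw [if_pos h2]
        simp [List.mem_cons, ih.1 h2]
        exact fun h => h1 h.symm
      · rw [if_neg h2]
        have hne : pvFIdx d t + 1 ≠ -1 := by have := pvFIdx_ge d t; omega
        have hd : d ∈ t := by by_contra hdt; exact h2 (ih.2 hdt)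
        simp [List.mem_cons, hne, hd]

theorem pvFIdx_spec (d : Char) (s : List Char) (h : d ∈ s) :
    s[(pvFIdx d s).toNat]? = some d ∧ ∀ j < (pvFIdx d s).toNat, s[j]? ≠ some d := by
  induction s with
  | nil => simp at h
  | cons c t ih =>
    by_cases hc : c = d
    · subst hc; simp [pvFIdx]
    · have hd : d ∈ t := by
        cases List.mem_cons.1 h with
        | inl h' => exact absurd h'.symm hc
        | inr h' => exact h'
      have hne : pvFIdx d t ≠ -1 := (not_iff_not.2 (pvFIdx_eq_neg_one_iff d t)).2 (by simpa using hd)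
      have hge : 0 ≤ pvFIdx d t := by have := pvFIdx_ge d t; omega
      have htn : (pvFIdx d t + 1).toNat = (pvFIdx d t).toNat + 1 := by omega
      obtain ⟨h1, h2⟩ := ih hd
      constructor
      · simp [pvFIdx, hc, hne, htn, h1]
      · intro j hj
        simp only [pvFIdx, hc, if_false, hne, htn] at hj
        match j with
        | 0 => simpa using hc
        | Nat.succ k =>
          have : k < (pvFIdx d t).toNat := by omega
          simpa using h2 k this

theorem pv_singleton_prefix (d : Char) (l : List Char) : [d] <+: l ↔ l.head? = some d := by
  constructor
  · rintro ⟨t, rfl⟩; rfl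
  · intro h
    match l, h with
    | c :: t, h => exact ⟨t, by simpa using (by simpa using h : c = d) ▸ rfl⟩

theorem pv_singleton_infix (d : Char) (s : List Char) : [d] <:+: s ↔ d ∈ s := by
  constructor
  · intro h; exact h.subset (List.mem_singleton_self d)
  · intro h
    obtain ⟨l1, l2, rfl⟩ := List.append_of_mem h
    exact ⟨l1, l2, by simp⟩

theorem pv_find_singleton (s : List Char) (d : Char) : PySem.Chars.find s [d] = pvFIdx d s := by
  by_cases h : d ∈ s
  · have hnn : 0 ≤ PySem.Chars.find s [d] := by
      rw [PySem.Chars.find_nonneg_iff]; exact (pv_singleton_infix d s).2 h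
    obtain ⟨hf1, hf2⟩ := PySem.Chars.find_spec hnn
    obtain ⟨hg1, hg2⟩ := pvFIdx_spec d s h
    have hge : 0 ≤ pvFIdx d s := by
      have := pvFIdx_ge d s
      have := (not_iff_not.2 (pvFIdx_eq_neg_one_iff d s)).2 (by simpa using h)
      omega
    have hf1' : s[(PySem.Chars.find s [d]).toNat]? = some d := by
      have := (pv_singleton_prefix d (s.drop (PySem.Chars.find s [d]).toNat)).1 hf1
      simpa [List.head?_drop] using this
    have key : (PySem.Chars.find s [d]).toNat = (pvFIdx d s).toNat := by
      rcases Nat.lt_trichotomy (PySem.Chars.find s [d]).toNat (pvFIdx d s).toNat with hlt | heq | hgt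
      · exact absurd hf1' (hg2 _ hlt)
      · exact heq
      · have := hf2 (pvFIdx d s).toNat hgt
        rw [pv_singleton_prefix, List.head?_drop] at this
        exact absurd hg1 this
    omega
  · rw [(PySem.Chars.find_eq_neg_one_iff _ _).2 (fun hc => h ((pv_singleton_infix d s).1 hc))]
    exact ((pvFIdx_eq_neg_one_iff d s).2 h).symm

-- B's body on an already-reversed-or-not char list
def pvBcore (s : List Char) : String :=
  let positions := pvDelims.filterMap (fun d =>
    let p := PySem.Chars.find s [d]
    if p = -1 then none else some p)
  match PySem.List.min? positions (fun x => x) with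
  | none => ""
  | some i =>
    match PySem.List.pyGet? s i with
    | some c => String.ofList [c]
    | none => ""

def pvPos (s : List Char) : List Int :=
  pvDelims.filterMap (fun d => if pvFIdx d s = -1 then none else some (pvFIdx d s))

theorem pvBcore_eq (s : List Char) :
    pvBcore s = (match PySem.List.min? (pvPos s) (fun x => x) with
      | none => ""
      | some i => (match PySem.List.pyGet? s i with
        | some c => String.ofList [c]
        | none => "")) := by
  simp only [pvBcore, pvPos, pv_find_singleton]

theorem pvPos_nonneg (s : List Char) : ∀ x ∈ pvPos s, 0 ≤ x := by
  intro x hx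
  obtain ⟨d, _, hd⟩ := List.mem_filterMap.1 hx
  by_cases h : pvFIdx d s = -1
  · simp [h] at hd
  · have := pvFIdx_ge d s
    simp only [h, if_false] at hd
    have : x = pvFIdx d s := by simpa using hd.symm
    omega

theorem pvMain (s : List Char) : pvScanA s = pvBcore s := by
  induction s with
  | nil =>
    have : pvPos ([] : List Char) = [] := by simp [pvPos, pvFIdx]
    rw [pvBcore_eq, this]
    simp [pvScanA, PySem.List.min?]
  | cons c t ih =>
    rw [pvBcore_eq]
    by_cases hc : c ∈ pvDelims
    · -- the head is a delimiter: min position is 0 and s[0] = c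
      have h0 : (0 : Int) ∈ pvPos (c :: t) := by
        refine List.mem_filterMap.2 ⟨c, hc, ?_⟩
        simp [pvFIdx]
      obtain ⟨m, hm⟩ : ∃ m, PySem.List.min? (pvPos (c :: t)) (fun x => x) = some m := by
        cases hmin : PySem.List.min? (pvPos (c :: t)) (fun x => x) with
        | none =>
          exact absurd ((PySem.List.min?_eq_none_iff _ _).1 hmin ▸ h0) (by simp)
        | some m => exact ⟨m, rfl⟩
      have hmem := PySem.List.min?_mem hm
      have hmin := PySem.List.min?_isMin hm 0 h0
      have hnn := pvPos_nonneg _ _ hmem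
      have hm0 : m = 0 := by omega
      rw [hm, hm0]
      simp [pvScanA, hc]
    · -- the head is not a delimiter: positions shift by one
      have hshift : pvPos (c :: t) = (pvPos t).map (· + 1) := by
        rw [pvPos, pvPos, List.map_filterMap]
        refine List.filterMap_congr (fun d hd => ?_)
        have hcd : c ≠ d := fun h => hc (h ▸ hd)
        have hge := pvFIdx_ge d t
        by_cases h1 : pvFIdx d t = -1
        · simp [pvFIdx, hcd, h1]
        · have h2 : pvFIdx d t + 1 ≠ -1 := by have := pvFIdx_ge d t; omega
          simp [pvFIdx, hcd, h1, h2]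
      cases hmt : PySem.List.min? (pvPos t) (fun x => x) with
      | none =>
        have ht : pvPos t = [] := (PySem.List.min?_eq_none_iff _ _).1 hmt
        have : pvPos (c :: t) = [] := by rw [hshift, ht]; rfl
        rw [this]
        have : PySem.List.min? ([] : List Int) (fun x => x) = none :=
          (PySem.List.min?_eq_none_iff _ _).2 rfl
        rw [this]
        have ih' := ih
        rw [pvBcore_eq, hmt] at ih'
        simpa [pvScanA, hc] using ih'
      | some m =>
        have hmem := PySem.List.min?_mem hmt
        have hnn : 0 ≤ m := pvPos_nonneg _ _ hmem
        -- min of the shifted list is m + 1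
        obtain ⟨m', hm'⟩ : ∃ m', PySem.List.min? (pvPos (c :: t)) (fun x => x) = some m' := by
          cases hx : PySem.List.min? (pvPos (c :: t)) (fun x => x) with
          | none =>
            have : pvPos (c :: t) = [] := (PySem.List.min?_eq_none_iff _ _).1 hx
            rw [hshift] at this
            simp [List.map_eq_nil_iff] at this
            exact absurd (this ▸ hmem) (by simp)
          | some m' => exact ⟨m', rfl⟩
        have hm'mem := PySem.List.min?_mem hm'
        have hm'min := PySem.List.min?_isMin hm'
        have hmmin := PySem.List.min?_isMin hmt
        have h1 : m' ≤ m + 1 := hm'min (m + 1) (by rw [hshift]; exact List.mem_map.2 ⟨m, hmem, rfl⟩)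
        have h2 : m + 1 ≤ m' := by
          rw [hshift] at hm'mem
          obtain ⟨x, hx, rfl⟩ := List.mem_map.1 hm'mem
          have := hmmin x hx
          omega
        have hm'' : m' = m + 1 := le_antisymm h1 h2
        rw [hm', hm'']
        have hget : PySem.List.pyGet? (c :: t) (m + 1) = PySem.List.pyGet? t m := by
          have hcast : m = ((m.toNat : Nat) : Int) := by omega
          rw [hcast, PySem.List.pyGet?_cons_succ, PySem.List.pyGet?_natCast]
        have ih' := ih
        rw [pvBcore_eq, hmt] at ih'
        simpa [pvScanA, hc, hget] using ih'

-- ===== VERDICT (by name: the statement is the Claim_ definition above) =====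
theorem find_delimiter_py_spec : Claim_equal_find_delimiter_py := by
  intro text reverse _
  unfold Spec_find_delimiter_py find_delimiter_py find_delimiter_py_alt
  exact pvMain _
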